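-- pv_equiv track=rewrite | github.com/majosaurus/uni-garbage | ib113/hw01_zadani.py | number_of_digits
-- ===== SOURCE A (Python) =====
-- def number_of_digits(n, limit):
--     digits_quantity = 0
--
--     while n > 0:
--         aux_variable = n % 10
--         if aux_variable >= limit:
--             digits_quantity = digits_quantity + 1
--         n = (n - aux_variable) // 10
--
--     return digits_quantity
-- ===== SOURCE B (Python) =====
-- def number_of_digits(n, limit):
--     if n <= 0:
--         return 0
--     return sum(1 for c in str(n) if int(c) >= limit)
-- ===== Notes on version B (the rewrite author's own statement) =====
-- stated objective: idiomatic
-- what changed: Replaces the hand-rolled while loop with arithmetic digit extraction (n % 10, (n - aux) // 10) by converting n to its decimal string once and counting the characters whose digit value is >= limit with a sum over a generator; n <= 0 has no positive digits, so it returns 0 there as A does.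
import Mathlib
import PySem

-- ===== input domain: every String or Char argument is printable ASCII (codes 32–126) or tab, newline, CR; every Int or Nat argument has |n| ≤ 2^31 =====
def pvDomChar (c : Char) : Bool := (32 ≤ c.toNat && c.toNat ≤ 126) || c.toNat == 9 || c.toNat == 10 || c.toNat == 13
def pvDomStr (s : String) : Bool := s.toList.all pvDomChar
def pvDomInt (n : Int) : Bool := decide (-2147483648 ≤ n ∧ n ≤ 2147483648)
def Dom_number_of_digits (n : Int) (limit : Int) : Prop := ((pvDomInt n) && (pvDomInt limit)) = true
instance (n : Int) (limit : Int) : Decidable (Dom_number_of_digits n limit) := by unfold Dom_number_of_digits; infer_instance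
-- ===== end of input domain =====

-- B converts n to its decimal string and counts digit characters >= limit,
-- replacing A's arithmetic while loop; return values proved equal everywhere.

-- ===== PORT A =====
-- the while loop: acc is digits_quantity; decreases since (n - n%10)//10 < n for n > 0
def numberOfDigitsLoop (n : Int) (limit : Int) (acc : Int) : Int :=
  if h : n > 0 then
    let aux := PySem.Int.mod n 10
    numberOfDigitsLoop (PySem.Int.floordiv (n - aux) 10) limit
      (if aux ≥ limit then acc + 1 else acc)
  else acc
termination_by n.toNat
decreasing_by
  have h10 : (0:Int) < 10 := by norm_num
  have hm := PySem.Int.mod_nonneg n h10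
  have hl := PySem.Int.mod_lt n h10
  have hd : (10:Int) ∣ (n - PySem.Int.mod n 10) := by
    have := PySem.Int.floordiv_mul_add_mod n 10
    exact ⟨PySem.Int.floordiv n 10, by linarith⟩
  rw [PySem.Int.floordiv_eq_ediv_of_pos h10]
  rcases hd with ⟨k, hk⟩
  have hk10 : (n - PySem.Int.mod n 10) / 10 = k := by
    rw [hk]; exact Int.mul_ediv_cancel_left k (by norm_num)
  rw [hk10]
  omega

def number_of_digits (n : Int) (limit : Int) : Int :=
  numberOfDigitsLoop n limit 0

-- ===== PORT B =====
-- int(c) for a single decimal-digit character (exact: str(n) of n > 0 yields only '0'..'9')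
def digitVal (c : Char) : Int := (c.toNat : Int) - 48

def number_of_digits_alt (n : Int) (limit : Int) : Int :=
  if n ≤ 0 then 0
  else ((PySem.Int.toChars n).countP (fun c => decide (limit ≤ digitVal c)) : Int)

-- ===== PRECONDITION & SPEC =====
def Spec_number_of_digits (n : Int) (limit : Int) (out : Int) : Prop := out = number_of_digits_alt n limit
instance (n : Int) (limit : Int) (out : Int) : Decidable (Spec_number_of_digits n limit out) := by unfold Spec_number_of_digits; infer_instance

-- ===== CLAIM (what is proved, stated in full; the proofs are below) =====
def Claim_equal_number_of_digits : Prop := ∀ (n : Int) (limit : Int), Dom_number_of_digits n limit → Spec_number_of_digits n limit (number_of_digits n limit)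

-- ===== LEMMAS AND PROOFS =====

lemma digitVal_digitChar (m : Nat) (h : m < 10) : digitVal (Nat.digitChar m) = (m : Int) := by
  interval_cases m <;> decide

lemma loop_eq_count (m : Nat) (hm : 0 < m) (limit acc : Int) :
    numberOfDigitsLoop (m : Int) limit acc
      = acc + ((Nat.toDigits 10 m).countP (fun c => decide (limit ≤ digitVal c)) : Int) := by
  induction m using Nat.strong_induction_on generalizing acc with
  | _ m ih =>
    rw [numberOfDigitsLoop]
    have hpos : ((m : Int) > 0) := by exact_mod_cast hm
    simp only [hpos, dif_pos]
    have h10 : (0:Int) < 10 := by norm_num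
    have hmod : PySem.Int.mod (m : Int) 10 = ((m % 10 : Nat) : Int) := by
      rw [PySem.Int.mod_eq_emod_of_pos h10]
      exact_mod_cast (Int.natCast_mod m 10).symm
    have hnext : PySem.Int.floordiv ((m : Int) - PySem.Int.mod (m : Int) 10) 10
        = ((m / 10 : Nat) : Int) := by
      rw [hmod, PySem.Int.floordiv_eq_ediv_of_pos h10]
      have : (m : Int) - ((m % 10 : Nat) : Int) = ((m / 10 : Nat) : Int) * 10 := by
        have := Nat.div_add_mod m 10
        push_cast
        omega
      rw [this, Int.mul_ediv_cancel _ (by norm_num)]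
    rw [hnext, hmod]
    by_cases hlt : m < 10
    · have hdiv : m / 10 = 0 := Nat.div_eq_of_lt hlt
      have hmm : m % 10 = m := Nat.mod_eq_of_lt hlt
      rw [hdiv, hmm]
      rw [numberOfDigitsLoop]
      simp only [Int.natCast_zero, gt_iff_lt, lt_irrefl, dif_neg, not_false_iff]
      rw [Nat.toDigits_of_lt_base hlt]
      simp only [List.countP_cons, List.countP_nil]
      rw [digitVal_digitChar m hlt]
      by_cases hge : ((m : Int) ≥ limit) <;> simp [hge, ge_iff_le]
    · push_neg at hlt
      have hd : 0 < m / 10 := Nat.div_pos hlt (by norm_num)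
      rw [ih (m / 10) (Nat.div_lt_self hm (by norm_num)) hd]
      rw [Nat.toDigits_of_base_le (by norm_num) hlt]
      rw [List.countP_append]
      simp only [List.countP_cons, List.countP_nil]
      have hm10 : m % 10 < 10 := Nat.mod_lt m (by norm_num)
      rw [digitVal_digitChar (m % 10) hm10]
      by_cases hge : (((m % 10 : Nat) : Int) ≥ limit) <;>
        simp [hge, ge_iff_le] <;> omega

-- ===== VERDICT (by name: the statement is the Claim_ definition above) =====
theorem number_of_digits_spec : Claim_equal_number_of_digits := by
  intro n limit _
  unfold Spec_number_of_digits number_of_digits number_of_digits_alt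
  by_cases hn : n ≤ 0
  · rw [numberOfDigitsLoop]
    simp [hn, not_lt.mpr hn]
  · rw [not_le] at hn
    rw [if_neg (not_le.mpr hn)]
    have hchars : PySem.Int.toChars n = Nat.toDigits 10 n.toNat := by
      simp only [PySem.Int.toChars, if_neg (by omega : ¬ n < 0)]
    rw [hchars]
    have hcast : ((n.toNat : Nat) : Int) = n := Int.toNat_of_nonneg (le_of_lt hn)
    conv_lhs => rw [← hcast]
    rw [loop_eq_count n.toNat (by omega) limit 0, zero_add]
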